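-- pv_equiv track=rewrite | github.com/goo-gy/Algorithm | programmers/2021_카카오_채용연계형_인턴십/2_거리두기_확인하기.py | checkOk
-- ===== SOURCE A (Python) =====
-- moves = [(-1, 0), (0, 1), (1, 0), (0, -1)]
--
-- def checkValid(row, col):
--     if(row < 0 or col < 0 or row >= 5 or col >= 5):
--         return False
--     else:
--         return True
--
-- def BFS(startRow, startCol, place):
--     rowLen = 5
--     colLen = 5
--     ll_visited = [[False for col in range(colLen)] for row in range(rowLen)]
--     ll_visited[startRow][startCol] = True
--     queue = [(startRow, startCol, 0)]
--     while(len(queue) > 0):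
--         row, col, dist = queue.pop(0)
--         for moveRow, moveCol in moves:
--             nextRow, nextCol = (row + moveRow, col + moveCol)
--             if(dist >= 2):
--                 return True
--             if(checkValid(nextRow, nextCol) and (not ll_visited[nextRow][nextCol])):
--                 if(place[nextRow][nextCol] == 'X'):
--                     continue
--                 if(place[nextRow][nextCol] == 'P'):
--                     return False
--                 ll_visited[nextRow][nextCol] = True
--                 queue.append((nextRow, nextCol, dist + 1))
--     return True
--
-- def checkOk(place):
--     for row in range(len(place)):
--         for col in range(len(place[row])):
--             if(place[row][col] == 'P'):
--                 isOk = BFS(row, col, place)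
--                 if(not isOk):
--                     return 0
--     return 1
-- ===== SOURCE B (Python) =====
-- def _violation(place, r, c):
--     # any occupied seat within Manhattan distance 2 reachable around blockers
--     if any(0 <= r+dr < 5 and 0 <= c+dc < 5 and place[r+dr][c+dc] == 'P'
--            for dr, dc in ((-1, 0), (1, 0), (0, -1), (0, 1))):
--         return True
--     if any(0 <= r+dr < 5 and 0 <= c+dc < 5
--            and place[r+dr//2][c+dc//2] != 'X' and place[r+dr][c+dc] == 'P'
--            for dr, dc in ((-2, 0), (2, 0), (0, -2), (0, 2))):
--         return True
--     if any(0 <= r+dr < 5 and 0 <= c+dc < 5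
--            and (place[r][c+dc] != 'X' or place[r+dr][c] != 'X')
--            and place[r+dr][c+dc] == 'P'
--            for dr, dc in ((-1, -1), (-1, 1), (1, -1), (1, 1))):
--         return True
--     return False
--
-- def checkOk(place):
--     for r in range(len(place)):
--         row = place[r]
--         for c in range(len(row)):
--             if row[c] == 'P' and _violation(place, r, c):
--                 return 0
--     return 1
-- ===== Notes on version B (the rewrite author's own statement) =====
-- stated objective: simpler
-- what changed: Replaces the per-seat BFS with queue and visited matrix by direct constant-distance pattern lookups: a distance-1 'P' always violates, a straight distance-2 'P' violates iff the middle cell is not 'X', a diagonal 'P' violates iff at least one of the two corner cells is not 'X'; Pre_ excludes grids that are not 5x5 unless they contain no 'P', because A's hardcoded 5x5 bounds index outside the actual grid and generally raise IndexError there.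
-- outside the precondition, e.g. on checkOk(['PPX']): A returns 0, B raises IndexError; on checkOk(['PXX', 'XXX']): A returns 1, B returns 1
import Mathlib
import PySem

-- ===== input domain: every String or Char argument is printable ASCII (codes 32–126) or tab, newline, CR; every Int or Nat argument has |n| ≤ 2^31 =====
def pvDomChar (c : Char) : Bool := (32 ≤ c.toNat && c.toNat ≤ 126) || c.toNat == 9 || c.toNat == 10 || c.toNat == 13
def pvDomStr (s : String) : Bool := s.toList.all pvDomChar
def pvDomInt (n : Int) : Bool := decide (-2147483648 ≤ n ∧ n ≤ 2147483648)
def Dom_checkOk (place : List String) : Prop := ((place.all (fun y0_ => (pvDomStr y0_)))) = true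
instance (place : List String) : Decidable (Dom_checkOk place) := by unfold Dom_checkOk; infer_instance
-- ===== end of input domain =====

-- B replaces A's per-seat BFS (queue + visited matrix) by direct constant-distance pattern
-- lookups; Pre_ restricts to 5x5 grids (or grids without 'P'), since A's hardcoded 5x5
-- bounds index outside other grids and generally raise IndexError there.


-- ===== PORT A =====

-- place[r] as a list of chars (exact under Pre_: index in range)
def pvRow (place : List String) (r : Int) : List Char :=
  (PySem.List.pyGetD place r "").toList

-- place[r][c] (exact under Pre_: both indices in range)
def pvCell (place : List String) (r c : Int) : Char :=
  PySem.List.pyGetD (pvRow place r) c ' '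

def pvMoves : List (Int × Int) := [(-1, 0), (0, 1), (1, 0), (0, -1)]

def checkValid (row col : Int) : Bool :=
  if row < 0 ∨ col < 0 ∨ 5 ≤ row ∨ 5 ≤ col then false else true

-- ll_visited[r][c]
def pvVis (v : List (List Bool)) (r c : Int) : Bool :=
  PySem.List.pyGetD (PySem.List.pyGetD v r []) c false

-- ll_visited[r][c] = True
def pvVisSet (v : List (List Bool)) (r c : Int) : List (List Bool) :=
  PySem.List.pySetD v r (PySem.List.pySetD (PySem.List.pyGetD v r []) c true)

-- one iteration of "for moveRow, moveCol in moves" (early return = .error)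
def pvStep (place : List String) (row col dist : Int)
    (st : List (List Bool) × List (Int × Int × Int)) (mv : Int × Int) :
    Except Bool (List (List Bool) × List (Int × Int × Int)) :=
  let nextRow := row + mv.1
  let nextCol := col + mv.2
  if 2 ≤ dist then .error true
  else if checkValid nextRow nextCol && !(pvVis st.1 nextRow nextCol) then
    if pvCell place nextRow nextCol == 'X' then .ok st
    else if pvCell place nextRow nextCol == 'P' then .error false
    else .ok (pvVisSet st.1 nextRow nextCol, st.2 ++ [(nextRow, nextCol, dist + 1)])
  else .ok st

-- "while len(queue) > 0"; fuel only makes the loop total (25 ≥ the ≤ 21 pops any run makes)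
def pvBfsLoop (place : List String) (fuel : Nat) (v : List (List Bool))
    (queue : List (Int × Int × Int)) : Bool :=
  match fuel, queue with
  | _, [] => true
  | 0, _ => true
  | f + 1, (row, col, dist) :: rest =>
    match List.foldlM (pvStep place row col dist) (v, rest) pvMoves with
    | .error b => b
    | .ok (v', q') => pvBfsLoop place f v' q'

def pvBFS (startRow startCol : Int) (place : List String) : Bool :=
  pvBfsLoop place 25
    (pvVisSet (List.replicate 5 (List.replicate 5 false)) startRow startCol)
    [(startRow, startCol, 0)]

def checkOk (place : List String) : Int :=
  match (PySem.List.pyRange 0 (place.length : Int) 1).foldlM (fun _ row =>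
      (PySem.List.pyRange 0 ((pvRow place row).length : Int) 1).foldlM (fun _ col =>
        if pvCell place row col == 'P' then
          (if !(pvBFS row col place) then Except.error (0 : Int) else .ok ())
        else .ok ()) ()) () with
  | .error z => z
  | .ok _ => 1

-- ===== PORT B =====

def pvOrtho : List (Int × Int) := [(-1, 0), (1, 0), (0, -1), (0, 1)]
def pvStraight : List (Int × Int) := [(-2, 0), (2, 0), (0, -2), (0, 2)]
def pvDiag : List (Int × Int) := [(-1, -1), (-1, 1), (1, -1), (1, 1)]

def pvIn5 (r c : Int) : Bool := (0 ≤ r && r < 5) && (0 ≤ c && c < 5)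

def pvViolation (place : List String) (r c : Int) : Bool :=
  pvOrtho.any (fun mv =>
      pvIn5 (r + mv.1) (c + mv.2) && pvCell place (r + mv.1) (c + mv.2) == 'P')
  || pvStraight.any (fun mv =>
      pvIn5 (r + mv.1) (c + mv.2)
      && !(pvCell place (r + PySem.Int.floordiv mv.1 2) (c + PySem.Int.floordiv mv.2 2) == 'X')
      && pvCell place (r + mv.1) (c + mv.2) == 'P')
  || pvDiag.any (fun mv =>
      pvIn5 (r + mv.1) (c + mv.2)
      && (!(pvCell place r (c + mv.2) == 'X') || !(pvCell place (r + mv.1) c == 'X'))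
      && pvCell place (r + mv.1) (c + mv.2) == 'P')

def checkOk_alt (place : List String) : Int :=
  match (PySem.List.pyRange 0 (place.length : Int) 1).foldlM (fun _ r =>
      (PySem.List.pyRange 0 ((pvRow place r).length : Int) 1).foldlM (fun _ c =>
        if pvCell place r c == 'P' && pvViolation place r c then Except.error (0 : Int)
        else .ok ()) ()) () with
  | .error z => z
  | .ok _ => 1

-- ===== PRECONDITION & SPEC =====

-- Pre_ excludes grids that are not exactly 5x5 yet contain a 'P': on those A's hardcoded
-- 5x5 bounds index outside the actual grid and generally raise IndexError (a few blocked
-- configurations still return, e.g. ["PXX","XXX"]; they are excluded with them).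
def Pre_checkOk (place : List String) : Prop :=
  (∀ s ∈ place, 'P' ∉ s.toList) ∨
  (place.length = 5 ∧ ∀ s ∈ place, s.toList.length = 5)
instance (place : List String) : Decidable (Pre_checkOk place) := by
  unfold Pre_checkOk; infer_instance

def pvWitness_checkOk : List String := ["POOOP", "OXXOX", "OPXPX", "OOXOX", "POXXP"]

def Spec_checkOk (place : List String) (out : Int) : Prop := out = checkOk_alt place
instance (place : List String) (out : Int) : Decidable (Spec_checkOk place out) := by
  unfold Spec_checkOk; infer_instance

-- ===== CLAIM (what is proved, stated in full; the proofs are below) =====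
def Claim_equal_checkOk : Prop :=
  ∀ (place : List String), Dom_checkOk place → Pre_checkOk place →
    Spec_checkOk place (checkOk place)

-- ===== LEMMAS AND PROOFS =====

-- 5x5 shape of the visited matrix
def pvShape (v : List (List Bool)) : Prop := v.length = 5 ∧ ∀ row ∈ v, row.length = 5

-- "some move of ms leads from (r,c) to a valid, unvisited 'P' cell"
def pvHitP (place : List String) (v : List (List Bool)) (r c : Int)
    (ms : List (Int × Int)) : Prop :=
  ∃ mv ∈ ms, checkValid (r + mv.1) (c + mv.2) = true ∧
    pvVis v (r + mv.1) (c + mv.2) = false ∧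
    pvCell place (r + mv.1) (c + mv.2) = 'P'

-- the cells the fold marks and enqueues: valid, unvisited, not 'X', not 'P'
def pvOpen (place : List String) (v : List (List Bool)) (t : Int × Int) : Bool :=
  checkValid t.1 t.2 && !(pvVis v t.1 t.2) &&
  !(pvCell place t.1 t.2 == 'X') && !(pvCell place t.1 t.2 == 'P')

def pvPicked (place : List String) (v : List (List Bool)) (r c : Int)
    (ms : List (Int × Int)) : List (Int × Int) :=
  (ms.map (fun mv => (r + mv.1, c + mv.2))).filter (pvOpen place v)


lemma checkValid_iff (r c : Int) :
    checkValid r c = true ↔ (0 ≤ r ∧ r < 5 ∧ 0 ≤ c ∧ c < 5) := by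
  simp [checkValid]; omega

lemma pyGetD_nonneg {α : Type} (xs : List α) (i : Int) (d : α) (h : 0 ≤ i) :
    PySem.List.pyGetD xs i d = xs.getD i.toNat d := by
  conv_lhs => rw [← Int.toNat_of_nonneg h]
  rw [PySem.List.pyGetD_natCast]

lemma getD_set {α : Type} (l : List α) (n m : Nat) (a d : α) :
    (l.set n a).getD m d = if n = m ∧ n < l.length then a else l.getD m d := by
  rcases lt_or_ge m l.length with h | h
  · rw [List.getD_eq_getElem _ _ (by simpa using h), List.getElem_set]
    split_ifs with h1 h2 h3 <;> simp_all [List.getD_eq_getElem] <;> omega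
  · rw [List.getD_eq_default _ _ (by simpa using h), List.getD_eq_default _ _ (by omega)]
    have : ¬(n = m ∧ n < l.length) := by omega
    simp [this]

lemma shape_init : pvShape (List.replicate 5 (List.replicate 5 false)) := by
  constructor
  · simp
  · intro row hrow
    simp only [List.eq_of_mem_replicate hrow]
    simp

lemma rowlen (v : List (List Bool)) (r : Int) (hs : pvShape v)
    (hr : 0 ≤ r) (hr5 : r < 5) : (v.getD r.toNat []).length = 5 := by
  have hlt : r.toNat < v.length := by have := hs.1; omega
  rw [List.getD_eq_getElem _ _ hlt]
  exact hs.2 _ (List.getElem_mem hlt)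

lemma rowlen' (v : List (List Bool)) (r : Int) (hs : pvShape v)
    (hr : 0 ≤ r) (hr5 : r < 5) : (PySem.List.pyGetD v r []).length = 5 := by
  rw [pyGetD_nonneg _ _ _ hr]; exact rowlen v r hs hr hr5

lemma vis_getD (v : List (List Bool)) (r c : Int) (hr : 0 ≤ r) (hc : 0 ≤ c) :
    pvVis v r c = (v.getD r.toNat []).getD c.toNat false := by
  simp [pvVis, pyGetD_nonneg _ _ _ hr, pyGetD_nonneg _ _ _ hc]

lemma shape_set (v : List (List Bool)) (r c : Int) (hs : pvShape v)
    (hr : 0 ≤ r) (hr5 : r < 5) : pvShape (pvVisSet v r c) := by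
  unfold pvVisSet
  rw [PySem.List.pySetD_of_nonneg _ _ hr]
  constructor
  · simpa using hs.1
  · intro row hrow
    rcases List.mem_or_eq_of_mem_set hrow with h | h
    · exact hs.2 _ h
    · rw [h, PySem.List.length_pySetD]
      exact rowlen' v r hs hr hr5

lemma vis_set (v : List (List Bool)) (r c r' c' : Int) (hs : pvShape v)
    (hr : 0 ≤ r) (hr5 : r < 5) (hc : 0 ≤ c) (hc5 : c < 5)
    (hr' : 0 ≤ r') (hr5' : r' < 5) (hc' : 0 ≤ c') (hc5' : c' < 5) :
    pvVis (pvVisSet v r c) r' c' = if r' = r ∧ c' = c then true else pvVis v r' c' := by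
  unfold pvVisSet
  rw [PySem.List.pySetD_of_nonneg _ _ hr, PySem.List.pySetD_of_nonneg _ _ hc,
    pyGetD_nonneg _ _ _ hr, vis_getD _ _ _ hr' hc', vis_getD _ _ _ hr' hc', getD_set]
  have hlen : r.toNat < v.length := by have := hs.1; omega
  by_cases hrr : r' = r
  · have : r.toNat = r'.toNat ∧ r.toNat < v.length := ⟨by omega, hlen⟩
    rw [if_pos this, hrr, getD_set]
    have hrl : (v.getD r.toNat []).length = 5 := rowlen v r hs hr hr5
    by_cases hcc : c' = c
    · rw [if_pos ⟨by omega, by omega⟩, if_pos ⟨rfl, hcc⟩]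
    · rw [if_neg (by omega), if_neg (by simp [hcc])]
  · rw [if_neg (by omega), if_neg (by simp [hrr])]

lemma vis_init (r c : Int) (hr : 0 ≤ r) (hr5 : r < 5) (hc : 0 ≤ c) (hc5 : c < 5) :
    pvVis (List.replicate 5 (List.replicate 5 false)) r c = false := by
  rw [vis_getD _ _ _ hr hc]
  have h1 : (List.replicate 5 (List.replicate 5 false)).getD r.toNat [] = List.replicate 5 false := by
    rw [List.getD_eq_getElem _ _ (by simp; omega)]; exact List.getElem_replicate _
  rw [h1, List.getD_eq_getElem _ _ (by simp; omega)]
  exact List.getElem_replicate _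

lemma open_set_ne (place : List String) (v : List (List Bool)) (a b : Int)
    (t : Int × Int) (hs : pvShape v)
    (ha : 0 ≤ a) (ha5 : a < 5) (hb : 0 ≤ b) (hb5 : b < 5) (hne : t ≠ (a, b)) :
    pvOpen place (pvVisSet v a b) t = pvOpen place v t := by
  by_cases hv : checkValid t.1 t.2 = true
  · have hbnd := (checkValid_iff t.1 t.2).mp hv
    unfold pvOpen
    rw [vis_set v a b t.1 t.2 hs ha ha5 hb hb5 hbnd.1 hbnd.2.1 hbnd.2.2.1 hbnd.2.2.2]
    rw [if_neg (by rintro ⟨h1, h2⟩; exact hne (Prod.ext h1 h2))]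
  · rw [Bool.not_eq_true] at hv
    simp [pvOpen, hv]

lemma hit_set_iff (place : List String) (v : List (List Bool)) (a b r c : Int)
    (ms : List (Int × Int)) (hs : pvShape v)
    (ha : 0 ≤ a) (ha5 : a < 5) (hb : 0 ≤ b) (hb5 : b < 5)
    (hPb : pvCell place a b ≠ 'P') :
    pvHitP place (pvVisSet v a b) r c ms ↔ pvHitP place v r c ms := by
  unfold pvHitP
  have key : ∀ mv : Int × Int, checkValid (r + mv.1) (c + mv.2) = true →
      pvCell place (r + mv.1) (c + mv.2) = 'P' →
      pvVis (pvVisSet v a b) (r + mv.1) (c + mv.2) = pvVis v (r + mv.1) (c + mv.2) := by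
    intro mv hv hP
    have hbnd := (checkValid_iff _ _).mp hv
    rw [vis_set v a b _ _ hs ha ha5 hb hb5 hbnd.1 hbnd.2.1 hbnd.2.2.1 hbnd.2.2.2]
    rw [if_neg]
    rintro ⟨h1, h2⟩
    exact hPb (by rw [← h1, ← h2]; exact hP)
  constructor
  · rintro ⟨mv, hm, hv, hvis, hP⟩
    exact ⟨mv, hm, hv, by rw [← key mv hv hP]; exact hvis, hP⟩
  · rintro ⟨mv, hm, hv, hvis, hP⟩
    exact ⟨mv, hm, hv, by rw [key mv hv hP]; exact hvis, hP⟩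

lemma hit_cons (place : List String) (v : List (List Bool)) (r c : Int)
    (mv : Int × Int) (ms : List (Int × Int)) :
    pvHitP place v r c (mv :: ms) ↔
      (checkValid (r + mv.1) (c + mv.2) = true ∧ pvVis v (r + mv.1) (c + mv.2) = false ∧
        pvCell place (r + mv.1) (c + mv.2) = 'P') ∨ pvHitP place v r c ms := by
  unfold pvHitP
  simp [List.mem_cons, or_and_right, exists_or]

lemma fold_spec (place : List String) (r c d : Int) (hd : d < 2) :
    ∀ (ms : List (Int × Int)) (v : List (List Bool)) (q : List (Int × Int × Int)),
      pvShape v →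
      (ms.map (fun mv => (r + mv.1, c + mv.2))).Pairwise (· ≠ ·) →
      (∀ res, List.foldlM (pvStep place r c d) (v, q) ms = .error res →
          res = false ∧ pvHitP place v r c ms) ∧
      (∀ v' q', List.foldlM (pvStep place r c d) (v, q) ms = .ok (v', q') →
          ¬ pvHitP place v r c ms ∧ pvShape v' ∧
          q' = q ++ (pvPicked place v r c ms).map (fun t => (t.1, t.2, d + 1)) ∧
          (∀ a b : Int, 0 ≤ a → a < 5 → 0 ≤ b → b < 5 →
            pvVis v' a b = (pvVis v a b || decide ((a, b) ∈ pvPicked place v r c ms)))) := by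
  intro ms
  induction ms with
  | nil =>
    intro v q hs hpw
    constructor
    · intro res h
      simp [List.foldlM_nil, pure, Except.pure] at h
    · intro v' q' h
      simp only [List.foldlM_nil, pure, Except.pure] at h
      injection h with h
      injection h with h1 h2
      subst h1; subst h2
      refine ⟨by simp [pvHitP], hs, by simp [pvPicked], ?_⟩
      intro a b _ _ _ _
      simp [pvPicked]
  | cons mv rest ih =>
    intro v q hs hpw
    rw [List.map_cons, List.pairwise_cons] at hpw
    have hnd : ¬ (2 ≤ d) := by omega
    by_cases hC : (checkValid (r + mv.1) (c + mv.2) && !pvVis v (r + mv.1) (c + mv.2)) = true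
    · rw [Bool.and_eq_true, Bool.not_eq_true'] at hC
      obtain ⟨hcv, hnv⟩ := hC
      by_cases hX : (pvCell place (r + mv.1) (c + mv.2) == 'X') = true
      · -- blocked cell: skip
        have hstep : pvStep place r c d (v, q) mv = .ok (v, q) := by
          simp [pvStep, hnd, hcv, hnv, hX]
        rw [List.foldlM_cons, hstep]
        simp only [Bind.bind, Except.bind]
        have hXeq : pvCell place (r + mv.1) (c + mv.2) = 'X' := by simpa using hX
        have hopen : pvOpen place v (r + mv.1, c + mv.2) = false := by
          simp [pvOpen, hXeq]
        have hpick : pvPicked place v r c (mv :: rest) = pvPicked place v r c rest := by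
          unfold pvPicked
          rw [List.map_cons, List.filter_cons_of_neg (by simpa using hopen)]
        have hhd : ¬ (checkValid (r + mv.1) (c + mv.2) = true ∧
            pvVis v (r + mv.1) (c + mv.2) = false ∧
            pvCell place (r + mv.1) (c + mv.2) = 'P') := by
          rintro ⟨-, -, hP⟩
          rw [hXeq] at hP
          exact absurd hP (by decide)
        obtain ⟨iherr, ihok⟩ := ih v q hs hpw.2
        constructor
        · intro res h
          obtain ⟨h1, h2⟩ := iherr res h
          exact ⟨h1, (hit_cons _ _ _ _ _ _).mpr (Or.inr h2)⟩
        · intro v' q' h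
          obtain ⟨h1, h2, h3, h4⟩ := ihok v' q' h
          refine ⟨?_, h2, by rw [hpick]; exact h3, ?_⟩
          · rw [hit_cons]; rintro (h | h); exact hhd h; exact h1 h
          · intro a b ha ha5 hb hb5; rw [hpick]; exact h4 a b ha ha5 hb hb5
      · by_cases hP : (pvCell place (r + mv.1) (c + mv.2) == 'P') = true
        · -- found a person: early False
          have hstep : pvStep place r c d (v, q) mv = .error false := by
            simp [pvStep, hnd, hcv, hnv, hX, hP]
          rw [List.foldlM_cons, hstep]
          simp only [Bind.bind, Except.bind]
          constructor
          · intro res h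
            injection h with h
            exact ⟨h.symm, (hit_cons _ _ _ _ _ _).mpr
              (Or.inl ⟨hcv, hnv, by simpa using hP⟩)⟩
          · intro v' q' h; exact absurd h (by simp)
        · -- open cell: mark and enqueue
          have hbnd := (checkValid_iff _ _).mp hcv
          have hstep : pvStep place r c d (v, q) mv =
              .ok (pvVisSet v (r + mv.1) (c + mv.2), q ++ [(r + mv.1, c + mv.2, d + 1)]) := by
            simp [pvStep, hnd, hcv, hnv, hX, hP]
          rw [List.foldlM_cons, hstep]
          simp only [Bind.bind, Except.bind]
          have hXne : pvCell place (r + mv.1) (c + mv.2) ≠ 'X' := by simpa using hX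
          have hPne : pvCell place (r + mv.1) (c + mv.2) ≠ 'P' := by simpa using hP
          have hopen : pvOpen place v (r + mv.1, c + mv.2) = true := by
            simp [pvOpen, hcv, hnv, hXne, hPne]
          have hs' := shape_set v (r + mv.1) (c + mv.2) hs hbnd.1 hbnd.2.1
          have hpickr : pvPicked place (pvVisSet v (r + mv.1) (c + mv.2)) r c rest =
              pvPicked place v r c rest := by
            unfold pvPicked
            apply List.filter_congr
            intro x hx
            exact open_set_ne place v _ _ x hs hbnd.1 hbnd.2.1 hbnd.2.2.1 hbnd.2.2.2
              (Ne.symm (hpw.1 x hx))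
          have hhitr := hit_set_iff place v (r + mv.1) (c + mv.2) r c rest hs
            hbnd.1 hbnd.2.1 hbnd.2.2.1 hbnd.2.2.2 hPne
          have hpickc : pvPicked place v r c (mv :: rest) =
              (r + mv.1, c + mv.2) :: pvPicked place v r c rest := by
            unfold pvPicked
            rw [List.map_cons, List.filter_cons_of_pos (by simpa using hopen)]
          obtain ⟨iherr, ihok⟩ := ih (pvVisSet v (r + mv.1) (c + mv.2))
            (q ++ [(r + mv.1, c + mv.2, d + 1)]) hs' hpw.2
          constructor
          · intro res h
            obtain ⟨h1, h2⟩ := iherr res h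
            exact ⟨h1, (hit_cons _ _ _ _ _ _).mpr (Or.inr (hhitr.mp h2))⟩
          · intro v' q' h
            obtain ⟨h1, h2, h3, h4⟩ := ihok v' q' h
            refine ⟨?_, h2, ?_, ?_⟩
            · rw [hit_cons]
              rintro (⟨-, -, hp⟩ | h)
              · exact hPne hp
              · exact h1 (hhitr.mpr h)
            · rw [h3, hpickr, hpickc, List.map_cons]; simp
            · intro a b ha ha5 hb hb5
              have := h4 a b ha ha5 hb hb5
              rw [this, hpickr, hpickc,
                vis_set v _ _ a b hs hbnd.1 hbnd.2.1 hbnd.2.2.1 hbnd.2.2.2 ha ha5 hb hb5]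
              by_cases hab : a = r + mv.1 ∧ b = c + mv.2
              · obtain ⟨h5, h6⟩ := hab
                subst h5; subst h6
                simp
              · rw [if_neg hab]
                have : ((a, b) ∈ (r + mv.1, c + mv.2) :: pvPicked place v r c rest) ↔
                    ((a, b) ∈ pvPicked place v r c rest) := by
                  simp only [List.mem_cons]
                  constructor
                  · rintro (h | h)
                    · exact absurd (Prod.mk.injEq .. ▸ h) (by simpa using hab)
                    · exact h
                  · exact Or.inr
                simp only [this]
    · -- invalid or already visited: skip
      have hstep : pvStep place r c d (v, q) mv = .ok (v, q) := by
        simp only [pvStep, if_neg hnd]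
        rw [if_neg hC]
      rw [List.foldlM_cons, hstep]
      simp only [Bind.bind, Except.bind]
      rw [Bool.not_eq_true] at hC
      have hopen : pvOpen place v (r + mv.1, c + mv.2) = false := by
        unfold pvOpen
        rcases Bool.and_eq_false_iff.mp hC with h | h <;> simp [h]
      have hpick : pvPicked place v r c (mv :: rest) = pvPicked place v r c rest := by
        unfold pvPicked
        rw [List.map_cons, List.filter_cons_of_neg (by simpa using hopen)]
      have hhd : ¬ (checkValid (r + mv.1) (c + mv.2) = true ∧
          pvVis v (r + mv.1) (c + mv.2) = false ∧
          pvCell place (r + mv.1) (c + mv.2) = 'P') := by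
        rintro ⟨h1, h2, -⟩
        rcases Bool.and_eq_false_iff.mp hC with h | h
        · rw [h1] at h; exact absurd h (by simp)
        · rw [Bool.not_eq_false'] at h; rw [h] at h2; exact absurd h2 (by simp)
      obtain ⟨iherr, ihok⟩ := ih v q hs hpw.2
      constructor
      · intro res h
        obtain ⟨h1, h2⟩ := iherr res h
        exact ⟨h1, (hit_cons _ _ _ _ _ _).mpr (Or.inr h2)⟩
      · intro v' q' h
        obtain ⟨h1, h2, h3, h4⟩ := ihok v' q' h
        refine ⟨?_, h2, by rw [hpick]; exact h3, ?_⟩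
        · rw [hit_cons]; rintro (h | h); exact hhd h; exact h1 h
        · intro a b ha ha5 hb hb5; rw [hpick]; exact h4 a b ha ha5 hb hb5

lemma pairwise_moves (r c : Int) :
    (pvMoves.map (fun mv => (r + mv.1, c + mv.2))).Pairwise (· ≠ ·) := by
  simp only [pvMoves, List.map_cons, List.map_nil]
  refine List.Pairwise.cons ?_ (List.Pairwise.cons ?_ (List.Pairwise.cons ?_
    (List.pairwise_singleton _ _))) <;>
    intro x hx <;> simp at hx <;>
    rcases hx with ⟨h1, h2⟩ | ⟨h1, h2⟩ | ⟨h1, h2⟩ <;> intro he <;>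
    rw [Prod.ext_iff] at he <;> omega

lemma open_iff (place : List String) (v : List (List Bool)) (x : Int × Int) :
    pvOpen place v x = true ↔
      checkValid x.1 x.2 = true ∧ pvVis v x.1 x.2 = false ∧
      pvCell place x.1 x.2 ≠ 'X' ∧ pvCell place x.1 x.2 ≠ 'P' := by
  simp [pvOpen, Bool.and_eq_true, Bool.not_eq_true', and_assoc]

lemma picked_mem (place : List String) (v : List (List Bool)) (r c : Int)
    (ms : List (Int × Int)) (x : Int × Int) :
    x ∈ pvPicked place v r c ms ↔
      (∃ mv ∈ ms, (r + mv.1, c + mv.2) = x) ∧ pvOpen place v x = true := by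
  unfold pvPicked
  simp [List.mem_filter, List.mem_map]

lemma loop_all2 (place : List String) :
    ∀ (fuel : Nat) (v : List (List Bool)) (q : List (Int × Int × Int)),
      (∀ e ∈ q, (2:Int) ≤ e.2.2) → pvBfsLoop place fuel v q = true := by
  intro fuel v q h
  cases fuel with
  | zero => cases q <;> rfl
  | succ f =>
    cases q with
    | nil => rfl
    | cons e rest =>
      rcases e with ⟨row, col, dist⟩
      have h2 : (2:Int) ≤ dist := by simpa using h _ List.mem_cons_self
      rw [pvBfsLoop]
      simp [pvMoves, List.foldlM_cons, pvStep, h2, Bind.bind, Except.bind]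

lemma hit_iff_of_mark (place : List String) (v v' : List (List Bool))
    (S : List (Int × Int)) (hS : ∀ x ∈ S, pvCell place x.1 x.2 ≠ 'P')
    (hvis : ∀ a b : Int, 0 ≤ a → a < 5 → 0 ≤ b → b < 5 →
      pvVis v' a b = (pvVis v a b || decide ((a, b) ∈ S)))
    (rr cc : Int) : pvHitP place v' rr cc pvMoves ↔ pvHitP place v rr cc pvMoves := by
  unfold pvHitP
  have key : ∀ mv : Int × Int, checkValid (rr + mv.1) (cc + mv.2) = true →
      pvCell place (rr + mv.1) (cc + mv.2) = 'P' →
      pvVis v' (rr + mv.1) (cc + mv.2) = pvVis v (rr + mv.1) (cc + mv.2) := by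
    intro mv hv hP
    have hbnd := (checkValid_iff _ _).mp hv
    have hn : ¬ ((rr + mv.1, cc + mv.2) ∈ S) := fun hmem => hS _ hmem hP
    rw [hvis _ _ hbnd.1 hbnd.2.1 hbnd.2.2.1 hbnd.2.2.2]
    simp [hn]
  constructor
  · rintro ⟨mv, hm, hv, hvv, hP⟩
    exact ⟨mv, hm, hv, by rw [← key mv hv hP]; exact hvv, hP⟩
  · rintro ⟨mv, hm, hv, hvv, hP⟩
    exact ⟨mv, hm, hv, by rw [key mv hv hP]; exact hvv, hP⟩

lemma loop_spec (place : List String) :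
    ∀ (q1 : List (Int × Int)) (fuel : Nat) (v : List (List Bool))
      (q2 : List (Int × Int × Int)),
      pvShape v → (∀ e ∈ q2, (2:Int) ≤ e.2.2) → q1.length < fuel →
      (pvBfsLoop place fuel v (q1.map (fun t => (t.1, t.2, (1:Int))) ++ q2) = false ↔
        ∃ t ∈ q1, pvHitP place v t.1 t.2 pvMoves) := by
  intro q1
  induction q1 with
  | nil =>
    intro fuel v q2 hs h2 hf
    simp [loop_all2 place fuel v q2 h2]
  | cons t rest ih =>
    intro fuel v q2 hs h2 hf
    obtain ⟨f, rfl⟩ : ∃ f, fuel = f + 1 := ⟨fuel - 1, by omega⟩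
    rw [List.map_cons, List.cons_append]
    obtain ⟨ferr, fok⟩ := fold_spec place t.1 t.2 1 (by omega) pvMoves v
      (rest.map (fun t => (t.1, t.2, (1:Int))) ++ q2) hs (pairwise_moves t.1 t.2)
    cases hres : List.foldlM (pvStep place t.1 t.2 1)
        (v, rest.map (fun t => (t.1, t.2, (1:Int))) ++ q2) pvMoves with
    | error b =>
      obtain ⟨hb, hhit⟩ := ferr b hres
      subst hb
      rw [pvBfsLoop, hres]
      constructor
      · intro _; exact ⟨t, List.mem_cons_self, hhit⟩
      · intro _; rfl
    | ok st =>
      rcases st with ⟨v', q'⟩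
      obtain ⟨hnot, hs', hq', hvis⟩ := fok v' q' hres
      rw [pvBfsLoop, hres]
      have hSnotP : ∀ x ∈ pvPicked place v t.1 t.2 pvMoves, pvCell place x.1 x.2 ≠ 'P' := by
        intro x hx
        exact (((open_iff place v x).mp ((picked_mem place v t.1 t.2 pvMoves x).mp hx).2)).2.2.2
      have hq'' : q' = rest.map (fun t => (t.1, t.2, (1:Int))) ++
          (q2 ++ (pvPicked place v t.1 t.2 pvMoves).map (fun t => (t.1, t.2, (1:Int) + 1))) := by
        rw [hq', List.append_assoc]
      rw [hq'']
      rw [ih f v' _ hs' ?h2 (by simp at hf ⊢; omega)]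
      case h2 =>
        intro e he
        rcases List.mem_append.mp he with h | h
        · exact h2 e h
        · rcases List.mem_map.mp h with ⟨x, -, rfl⟩
          norm_num
      constructor
      · rintro ⟨t', hm, hh⟩
        exact ⟨t', List.mem_cons_of_mem _ hm,
          (hit_iff_of_mark place v v' _ hSnotP hvis t'.1 t'.2).mp hh⟩
      · rintro ⟨t', hm, hh⟩
        rcases List.mem_cons.mp hm with rfl | hm'
        · exact absurd hh hnot
        · exact ⟨t', hm', (hit_iff_of_mark place v v' _ hSnotP hvis t'.1 t'.2).mpr hh⟩

-- the reachability condition A's BFS tests: a 'P' one move away, or one reached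
-- through an open (valid, not 'X', not 'P') intermediate cell other than the start
def pvReach (place : List String) (r c : Int) : Prop :=
  (∃ mv ∈ pvMoves, checkValid (r + mv.1) (c + mv.2) = true ∧
    pvCell place (r + mv.1) (c + mv.2) = 'P') ∨
  (∃ mv ∈ pvMoves, ∃ mw ∈ pvMoves,
    checkValid (r + mv.1) (c + mv.2) = true ∧
    pvCell place (r + mv.1) (c + mv.2) ≠ 'X' ∧
    pvCell place (r + mv.1) (c + mv.2) ≠ 'P' ∧
    checkValid (r + mv.1 + mw.1) (c + mv.2 + mw.2) = true ∧
    (r + mv.1 + mw.1, c + mv.2 + mw.2) ≠ (r, c) ∧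
    pvCell place (r + mv.1 + mw.1) (c + mv.2 + mw.2) = 'P')

lemma vis_start (r c a b : Int)
    (hr : 0 ≤ r) (hr5 : r < 5) (hc : 0 ≤ c) (hc5 : c < 5)
    (ha : 0 ≤ a) (ha5 : a < 5) (hb : 0 ≤ b) (hb5 : b < 5) :
    pvVis (pvVisSet (List.replicate 5 (List.replicate 5 false)) r c) a b =
      decide (a = r ∧ b = c) := by
  rw [vis_set _ r c a b shape_init hr hr5 hc hc5 ha ha5 hb hb5]
  by_cases h : a = r ∧ b = c
  · simp [h]
  · simp only [if_neg h, vis_init a b ha ha5 hb hb5]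
    simp [h]

lemma mv_ne_zero (mv : Int × Int) (hm : mv ∈ pvMoves) : mv ≠ (0, 0) := by
  intro h
  subst h
  exact absurd hm (by decide)

lemma bfs_false_iff (place : List String) (r c : Int)
    (hr : 0 ≤ r) (hr5 : r < 5) (hc : 0 ≤ c) (hc5 : c < 5) :
    (pvBFS r c place = false) ↔ pvReach place r c := by
  unfold pvBFS
  have hs1 : pvShape (pvVisSet (List.replicate 5 (List.replicate 5 false)) r c) :=
    shape_set _ _ _ shape_init hr hr5
  obtain ⟨ferr, fok⟩ := fold_spec place r c 0 (by omega) pvMoves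
    (pvVisSet (List.replicate 5 (List.replicate 5 false)) r c) [] hs1 (pairwise_moves r c)
  have h25 : (25 : Nat) = 24 + 1 := rfl
  rw [h25]
  cases hres : List.foldlM (pvStep place r c 0)
      (pvVisSet (List.replicate 5 (List.replicate 5 false)) r c, []) pvMoves with
  | error b =>
    obtain ⟨hb, hhit⟩ := ferr b hres
    subst hb
    rw [pvBfsLoop, hres]
    constructor
    · intro _
      obtain ⟨mv, hm, hcv, -, hP⟩ := hhit
      exact Or.inl ⟨mv, hm, hcv, hP⟩
    · intro _; rfl
  | ok st =>
    rcases st with ⟨v2, q'⟩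
    obtain ⟨hnot, hs2, hq', hvis⟩ := fok v2 q' hres
    rw [pvBfsLoop, hres]
    show pvBfsLoop place 24 v2 q' = false ↔ _
    rw [hq']
    have hlen : (pvPicked place (pvVisSet (List.replicate 5 (List.replicate 5 false)) r c)
        r c pvMoves).length < 24 := by
      have h1 := List.length_filter_le
        (pvOpen place (pvVisSet (List.replicate 5 (List.replicate 5 false)) r c))
        (pvMoves.map (fun mv => (r + mv.1, c + mv.2)))
      simp only [pvPicked]
      simp [pvMoves] at h1 ⊢
      omega
    have h01 : (0 : Int) + 1 = 1 := by norm_num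
    rw [List.nil_append, h01]
    rw [show (List.map (fun t : Int × Int => (t.1, t.2, (1:Int)))
          (pvPicked place (pvVisSet (List.replicate 5 (List.replicate 5 false)) r c) r c pvMoves)) =
        (List.map (fun t : Int × Int => (t.1, t.2, (1:Int)))
          (pvPicked place (pvVisSet (List.replicate 5 (List.replicate 5 false)) r c) r c pvMoves)) ++ []
      from (List.append_nil _).symm]
    rw [loop_spec place _ 24 v2 [] hs2 (by simp) hlen]
    set v1 := pvVisSet (List.replicate 5 (List.replicate 5 false)) r c with hv1def
    have hnotpicked : ∀ x ∈ pvPicked place v1 r c pvMoves, pvCell place x.1 x.2 ≠ 'P' := by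
      intro x hx
      exact ((open_iff place v1 x).mp ((picked_mem place v1 r c pvMoves x).mp hx).2).2.2.2
    constructor
    · rintro ⟨t, ht, hhit⟩
      obtain ⟨⟨mv, hm, heq⟩, hopen⟩ := (picked_mem place v1 r c pvMoves t).mp ht
      obtain ⟨hcvt, hvt, hXt, hPt⟩ := (open_iff place v1 t).mp hopen
      obtain ⟨mw, hmw, hcvn, hvisn, hPn⟩ := hhit
      subst heq
      refine Or.inr ⟨mv, hm, mw, hmw, hcvt, hXt, hPt, hcvn, ?_, hPn⟩
      -- the target is unvisited in v2, hence not the start cell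
      intro hne
      have hbnd := (checkValid_iff _ _).mp hcvn
      rw [hvis _ _ hbnd.1 hbnd.2.1 hbnd.2.2.1 hbnd.2.2.2] at hvisn
      rw [hv1def, vis_start r c _ _ hr hr5 hc hc5 hbnd.1 hbnd.2.1 hbnd.2.2.1 hbnd.2.2.2] at hvisn
      rw [Prod.ext_iff] at hne
      simp at hvisn
      exact hvisn.1 hne.1 hne.2
    · rintro (⟨mv, hm, hcv, hP⟩ | ⟨mv, hm, mw, hmw, hcvm, hXm, hPm, hcvn, hne, hPn⟩)
      · -- a 'P' right next to the start: the fold would have returned False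
        exfalso
        apply hnot
        have hbnd := (checkValid_iff _ _).mp hcv
        refine ⟨mv, hm, hcv, ?_, hP⟩
        rw [hv1def, vis_start r c _ _ hr hr5 hc hc5 hbnd.1 hbnd.2.1 hbnd.2.2.1 hbnd.2.2.2]
        have := mv_ne_zero mv hm
        rw [Ne, Prod.ext_iff] at this
        simp only [decide_eq_false_iff_not]
        intro hcon
        exact this (by constructor <;> omega)
      · have hbndm := (checkValid_iff _ _).mp hcvm
        have hbndn := (checkValid_iff _ _).mp hcvn
        have hvm : pvVis v1 (r + mv.1) (c + mv.2) = false := by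
          rw [hv1def, vis_start r c _ _ hr hr5 hc hc5 hbndm.1 hbndm.2.1 hbndm.2.2.1 hbndm.2.2.2]
          have := mv_ne_zero mv hm
          rw [Ne, Prod.ext_iff] at this
          simp only [decide_eq_false_iff_not]
          intro hcon
          exact this (by constructor <;> omega)
        have htm : (r + mv.1, c + mv.2) ∈ pvPicked place v1 r c pvMoves :=
          (picked_mem place v1 r c pvMoves _).mpr
            ⟨⟨mv, hm, rfl⟩, (open_iff place v1 _).mpr ⟨hcvm, hvm, hXm, hPm⟩⟩
        refine ⟨(r + mv.1, c + mv.2), htm, mw, hmw, hcvn, ?_, hPn⟩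
        rw [hvis _ _ hbndn.1 hbndn.2.1 hbndn.2.2.1 hbndn.2.2.2]
        have h1 : pvVis v1 (r + mv.1 + mw.1) (c + mv.2 + mw.2) = false := by
          rw [hv1def, vis_start r c _ _ hr hr5 hc hc5 hbndn.1 hbndn.2.1 hbndn.2.2.1 hbndn.2.2.2]
          simp only [decide_eq_false_iff_not]
          intro hcon
          exact hne (by rw [Prod.ext_iff]; exact hcon)
        have h2 : ¬ ((r + mv.1 + mw.1, c + mv.2 + mw.2) ∈ pvPicked place v1 r c pvMoves) :=
          fun hmem => hnotpicked _ hmem hPn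
        rw [h1]
        simp [h2]

lemma in5_iff (a b : Int) : pvIn5 a b = true ↔ (0 ≤ a ∧ a < 5 ∧ 0 ≤ b ∧ b < 5) := by
  simp [pvIn5, and_assoc]

lemma viol_clauses (place : List String) (r c : Int) :
    pvViolation place r c = true ↔
      (∃ mv ∈ pvOrtho, pvIn5 (r + mv.1) (c + mv.2) = true ∧
        pvCell place (r + mv.1) (c + mv.2) = 'P') ∨
      (∃ mv ∈ pvStraight, pvIn5 (r + mv.1) (c + mv.2) = true ∧
        pvCell place (r + PySem.Int.floordiv mv.1 2) (c + PySem.Int.floordiv mv.2 2) ≠ 'X' ∧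
        pvCell place (r + mv.1) (c + mv.2) = 'P') ∨
      (∃ mv ∈ pvDiag, pvIn5 (r + mv.1) (c + mv.2) = true ∧
        (pvCell place r (c + mv.2) ≠ 'X' ∨ pvCell place (r + mv.1) c ≠ 'X') ∧
        pvCell place (r + mv.1) (c + mv.2) = 'P') := by
  unfold pvViolation
  simp only [Bool.or_eq_true, List.any_eq_true, Bool.and_eq_true, beq_iff_eq,
    Bool.not_eq_true', beq_eq_false_iff_ne, and_assoc, or_assoc]

lemma viol_iff (place : List String) (r c : Int)
    (hr : 0 ≤ r) (hr5 : r < 5) (hc : 0 ≤ c) (hc5 : c < 5) :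
    pvReach place r c ↔ pvViolation place r c = true := by
  rw [viol_clauses]
  constructor
  · rintro (⟨mv, hm, hcv, hP⟩ | ⟨mv, hm, mw, hmw, hcvm, hXm, hPm, hcvn, hne, hPn⟩)
    · exact Or.inl ⟨mv, (by decide : ∀ x ∈ pvMoves, x ∈ pvOrtho) mv hm,
        (in5_iff _ _).mpr (by have := (checkValid_iff _ _).mp hcv; omega), hP⟩
    · simp only [pvMoves, List.mem_cons, List.not_mem_nil, or_false] at hm hmw
      rcases hm with rfl | rfl | rfl | rfl <;> rcases hmw with rfl | rfl | rfl | rfl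
      · refine Or.inr (Or.inl ⟨(-2, 0), by decide, ?_, ?_, ?_⟩)
        · refine (in5_iff _ _).mpr ?_
          have hb := (checkValid_iff _ _).mp hcvn
          omega
        · have hXm' : pvCell place (r + -1) (c + 0) ≠ 'X' := hXm
          exact hXm'
        · ring_nf at hPn ⊢; exact hPn
      · refine Or.inr (Or.inr ⟨(-1, 1), by decide, ?_, Or.inr ?_, ?_⟩)
        · refine (in5_iff _ _).mpr ?_
          have hb := (checkValid_iff _ _).mp hcvn
          omega
        · ring_nf at hXm ⊢; exact hXm
        · ring_nf at hPn ⊢; exact hPn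
      · exact absurd (show ((r + -1 + 1 : Int), (c + 0 + 0 : Int)) = (r, c) by
          rw [Prod.mk.injEq]; constructor <;> ring) hne
      · refine Or.inr (Or.inr ⟨(-1, -1), by decide, ?_, Or.inr ?_, ?_⟩)
        · refine (in5_iff _ _).mpr ?_
          have hb := (checkValid_iff _ _).mp hcvn
          omega
        · ring_nf at hXm ⊢; exact hXm
        · ring_nf at hPn ⊢; exact hPn
      · refine Or.inr (Or.inr ⟨(-1, 1), by decide, ?_, Or.inl ?_, ?_⟩)
        · refine (in5_iff _ _).mpr ?_
          have hb := (checkValid_iff _ _).mp hcvn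
          omega
        · ring_nf at hXm ⊢; exact hXm
        · ring_nf at hPn ⊢; exact hPn
      · refine Or.inr (Or.inl ⟨(0, 2), by decide, ?_, ?_, ?_⟩)
        · refine (in5_iff _ _).mpr ?_
          have hb := (checkValid_iff _ _).mp hcvn
          omega
        · have hXm' : pvCell place (r + 0) (c + 1) ≠ 'X' := hXm
          exact hXm'
        · ring_nf at hPn ⊢; exact hPn
      · refine Or.inr (Or.inr ⟨(1, 1), by decide, ?_, Or.inl ?_, ?_⟩)
        · refine (in5_iff _ _).mpr ?_
          have hb := (checkValid_iff _ _).mp hcvn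
          omega
        · ring_nf at hXm ⊢; exact hXm
        · ring_nf at hPn ⊢; exact hPn
      · exact absurd (show ((r + 0 + 0 : Int), (c + 1 + -1 : Int)) = (r, c) by
          rw [Prod.mk.injEq]; constructor <;> ring) hne
      · exact absurd (show ((r + 1 + -1 : Int), (c + 0 + 0 : Int)) = (r, c) by
          rw [Prod.mk.injEq]; constructor <;> ring) hne
      · refine Or.inr (Or.inr ⟨(1, 1), by decide, ?_, Or.inr ?_, ?_⟩)
        · refine (in5_iff _ _).mpr ?_
          have hb := (checkValid_iff _ _).mp hcvn
          omega
        · ring_nf at hXm ⊢; exact hXm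
        · ring_nf at hPn ⊢; exact hPn
      · refine Or.inr (Or.inl ⟨(2, 0), by decide, ?_, ?_, ?_⟩)
        · refine (in5_iff _ _).mpr ?_
          have hb := (checkValid_iff _ _).mp hcvn
          omega
        · have hXm' : pvCell place (r + 1) (c + 0) ≠ 'X' := hXm
          exact hXm'
        · ring_nf at hPn ⊢; exact hPn
      · refine Or.inr (Or.inr ⟨(1, -1), by decide, ?_, Or.inr ?_, ?_⟩)
        · refine (in5_iff _ _).mpr ?_
          have hb := (checkValid_iff _ _).mp hcvn
          omega
        · ring_nf at hXm ⊢; exact hXm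
        · ring_nf at hPn ⊢; exact hPn
      · refine Or.inr (Or.inr ⟨(-1, -1), by decide, ?_, Or.inl ?_, ?_⟩)
        · refine (in5_iff _ _).mpr ?_
          have hb := (checkValid_iff _ _).mp hcvn
          omega
        · ring_nf at hXm ⊢; exact hXm
        · ring_nf at hPn ⊢; exact hPn
      · exact absurd (show ((r + 0 + 0 : Int), (c + -1 + 1 : Int)) = (r, c) by
          rw [Prod.mk.injEq]; constructor <;> ring) hne
      · refine Or.inr (Or.inr ⟨(1, -1), by decide, ?_, Or.inl ?_, ?_⟩)
        · refine (in5_iff _ _).mpr ?_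
          have hb := (checkValid_iff _ _).mp hcvn
          omega
        · ring_nf at hXm ⊢; exact hXm
        · ring_nf at hPn ⊢; exact hPn
      · refine Or.inr (Or.inl ⟨(0, -2), by decide, ?_, ?_, ?_⟩)
        · refine (in5_iff _ _).mpr ?_
          have hb := (checkValid_iff _ _).mp hcvn
          omega
        · have hXm' : pvCell place (r + 0) (c + -1) ≠ 'X' := hXm
          exact hXm'
        · ring_nf at hPn ⊢; exact hPn
  · rintro (⟨mv, hm, hin, hP⟩ | ⟨mv, hm, hin, hmid, hP⟩ | ⟨mv, hm, hin, hcor, hP⟩)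
    · exact Or.inl ⟨mv, (by decide : ∀ x ∈ pvOrtho, x ∈ pvMoves) mv hm,
        (checkValid_iff _ _).mpr (by have := (in5_iff _ _).mp hin; omega), hP⟩
    · simp only [pvStraight, List.mem_cons, List.not_mem_nil, or_false] at hm
      rcases hm with rfl | rfl | rfl | rfl
      · by_cases hmidP : pvCell place (r + -1) (c + 0) = 'P'
        · refine Or.inl ⟨(-1, 0), by decide, (checkValid_iff _ _).mpr ?_, hmidP⟩
          have := (in5_iff _ _).mp hin; omega
        · refine Or.inr ⟨(-1, 0), by decide, (-1, 0), by decide,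
            (checkValid_iff _ _).mpr ?_, ?_, hmidP, (checkValid_iff _ _).mpr ?_, ?_, ?_⟩
          · have := (in5_iff _ _).mp hin; omega
          · have hmid' : pvCell place (r + -1) (c + 0) ≠ 'X' := hmid
            exact hmid'
          · have := (in5_iff _ _).mp hin; omega
          · intro hne2; rw [Prod.mk.injEq] at hne2; omega
          · ring_nf at hP ⊢; exact hP
      · by_cases hmidP : pvCell place (r + 1) (c + 0) = 'P'
        · refine Or.inl ⟨(1, 0), by decide, (checkValid_iff _ _).mpr ?_, hmidP⟩
          have := (in5_iff _ _).mp hin; omega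
        · refine Or.inr ⟨(1, 0), by decide, (1, 0), by decide,
            (checkValid_iff _ _).mpr ?_, ?_, hmidP, (checkValid_iff _ _).mpr ?_, ?_, ?_⟩
          · have := (in5_iff _ _).mp hin; omega
          · have hmid' : pvCell place (r + 1) (c + 0) ≠ 'X' := hmid
            exact hmid'
          · have := (in5_iff _ _).mp hin; omega
          · intro hne2; rw [Prod.mk.injEq] at hne2; omega
          · ring_nf at hP ⊢; exact hP
      · by_cases hmidP : pvCell place (r + 0) (c + -1) = 'P'
        · refine Or.inl ⟨(0, -1), by decide, (checkValid_iff _ _).mpr ?_, hmidP⟩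
          have := (in5_iff _ _).mp hin; omega
        · refine Or.inr ⟨(0, -1), by decide, (0, -1), by decide,
            (checkValid_iff _ _).mpr ?_, ?_, hmidP, (checkValid_iff _ _).mpr ?_, ?_, ?_⟩
          · have := (in5_iff _ _).mp hin; omega
          · have hmid' : pvCell place (r + 0) (c + -1) ≠ 'X' := hmid
            exact hmid'
          · have := (in5_iff _ _).mp hin; omega
          · intro hne2; rw [Prod.mk.injEq] at hne2; omega
          · ring_nf at hP ⊢; exact hP
      · by_cases hmidP : pvCell place (r + 0) (c + 1) = 'P'
        · refine Or.inl ⟨(0, 1), by decide, (checkValid_iff _ _).mpr ?_, hmidP⟩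
          have := (in5_iff _ _).mp hin; omega
        · refine Or.inr ⟨(0, 1), by decide, (0, 1), by decide,
            (checkValid_iff _ _).mpr ?_, ?_, hmidP, (checkValid_iff _ _).mpr ?_, ?_, ?_⟩
          · have := (in5_iff _ _).mp hin; omega
          · have hmid' : pvCell place (r + 0) (c + 1) ≠ 'X' := hmid
            exact hmid'
          · have := (in5_iff _ _).mp hin; omega
          · intro hne2; rw [Prod.mk.injEq] at hne2; omega
          · ring_nf at hP ⊢; exact hP
    · simp only [pvDiag, List.mem_cons, List.not_mem_nil, or_false] at hm
      rcases hm with rfl | rfl | rfl | rfl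
      · rcases hcor with hA | hB
        · by_cases hcp : pvCell place (r + 0) (c + -1) = 'P'
          · refine Or.inl ⟨(0, -1), by decide, (checkValid_iff _ _).mpr ?_, hcp⟩
            have := (in5_iff _ _).mp hin; omega
          · refine Or.inr ⟨(0, -1), by decide, (-1, 0), by decide,
              (checkValid_iff _ _).mpr ?_, ?_, hcp, (checkValid_iff _ _).mpr ?_, ?_, ?_⟩
            · have := (in5_iff _ _).mp hin; omega
            · ring_nf at hA ⊢; exact hA
            · have := (in5_iff _ _).mp hin; omega
            · intro hne2; rw [Prod.mk.injEq] at hne2; omega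
            · ring_nf at hP ⊢; exact hP
        · by_cases hcp : pvCell place (r + -1) (c + 0) = 'P'
          · refine Or.inl ⟨(-1, 0), by decide, (checkValid_iff _ _).mpr ?_, hcp⟩
            have := (in5_iff _ _).mp hin; omega
          · refine Or.inr ⟨(-1, 0), by decide, (0, -1), by decide,
              (checkValid_iff _ _).mpr ?_, ?_, hcp, (checkValid_iff _ _).mpr ?_, ?_, ?_⟩
            · have := (in5_iff _ _).mp hin; omega
            · ring_nf at hB ⊢; exact hB
            · have := (in5_iff _ _).mp hin; omega
            · intro hne2; rw [Prod.mk.injEq] at hne2; omega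
            · ring_nf at hP ⊢; exact hP
      · rcases hcor with hA | hB
        · by_cases hcp : pvCell place (r + 0) (c + 1) = 'P'
          · refine Or.inl ⟨(0, 1), by decide, (checkValid_iff _ _).mpr ?_, hcp⟩
            have := (in5_iff _ _).mp hin; omega
          · refine Or.inr ⟨(0, 1), by decide, (-1, 0), by decide,
              (checkValid_iff _ _).mpr ?_, ?_, hcp, (checkValid_iff _ _).mpr ?_, ?_, ?_⟩
            · have := (in5_iff _ _).mp hin; omega
            · ring_nf at hA ⊢; exact hA
            · have := (in5_iff _ _).mp hin; omega
            · intro hne2; rw [Prod.mk.injEq] at hne2; omega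
            · ring_nf at hP ⊢; exact hP
        · by_cases hcp : pvCell place (r + -1) (c + 0) = 'P'
          · refine Or.inl ⟨(-1, 0), by decide, (checkValid_iff _ _).mpr ?_, hcp⟩
            have := (in5_iff _ _).mp hin; omega
          · refine Or.inr ⟨(-1, 0), by decide, (0, 1), by decide,
              (checkValid_iff _ _).mpr ?_, ?_, hcp, (checkValid_iff _ _).mpr ?_, ?_, ?_⟩
            · have := (in5_iff _ _).mp hin; omega
            · ring_nf at hB ⊢; exact hB
            · have := (in5_iff _ _).mp hin; omega
            · intro hne2; rw [Prod.mk.injEq] at hne2; omega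
            · ring_nf at hP ⊢; exact hP
      · rcases hcor with hA | hB
        · by_cases hcp : pvCell place (r + 0) (c + -1) = 'P'
          · refine Or.inl ⟨(0, -1), by decide, (checkValid_iff _ _).mpr ?_, hcp⟩
            have := (in5_iff _ _).mp hin; omega
          · refine Or.inr ⟨(0, -1), by decide, (1, 0), by decide,
              (checkValid_iff _ _).mpr ?_, ?_, hcp, (checkValid_iff _ _).mpr ?_, ?_, ?_⟩
            · have := (in5_iff _ _).mp hin; omega
            · ring_nf at hA ⊢; exact hA
            · have := (in5_iff _ _).mp hin; omega
            · intro hne2; rw [Prod.mk.injEq] at hne2; omega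
            · ring_nf at hP ⊢; exact hP
        · by_cases hcp : pvCell place (r + 1) (c + 0) = 'P'
          · refine Or.inl ⟨(1, 0), by decide, (checkValid_iff _ _).mpr ?_, hcp⟩
            have := (in5_iff _ _).mp hin; omega
          · refine Or.inr ⟨(1, 0), by decide, (0, -1), by decide,
              (checkValid_iff _ _).mpr ?_, ?_, hcp, (checkValid_iff _ _).mpr ?_, ?_, ?_⟩
            · have := (in5_iff _ _).mp hin; omega
            · ring_nf at hB ⊢; exact hB
            · have := (in5_iff _ _).mp hin; omega
            · intro hne2; rw [Prod.mk.injEq] at hne2; omega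
            · ring_nf at hP ⊢; exact hP
      · rcases hcor with hA | hB
        · by_cases hcp : pvCell place (r + 0) (c + 1) = 'P'
          · refine Or.inl ⟨(0, 1), by decide, (checkValid_iff _ _).mpr ?_, hcp⟩
            have := (in5_iff _ _).mp hin; omega
          · refine Or.inr ⟨(0, 1), by decide, (1, 0), by decide,
              (checkValid_iff _ _).mpr ?_, ?_, hcp, (checkValid_iff _ _).mpr ?_, ?_, ?_⟩
            · have := (in5_iff _ _).mp hin; omega
            · ring_nf at hA ⊢; exact hA
            · have := (in5_iff _ _).mp hin; omega
            · intro hne2; rw [Prod.mk.injEq] at hne2; omega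
            · ring_nf at hP ⊢; exact hP
        · by_cases hcp : pvCell place (r + 1) (c + 0) = 'P'
          · refine Or.inl ⟨(1, 0), by decide, (checkValid_iff _ _).mpr ?_, hcp⟩
            have := (in5_iff _ _).mp hin; omega
          · refine Or.inr ⟨(1, 0), by decide, (0, 1), by decide,
              (checkValid_iff _ _).mpr ?_, ?_, hcp, (checkValid_iff _ _).mpr ?_, ?_, ?_⟩
            · have := (in5_iff _ _).mp hin; omega
            · ring_nf at hB ⊢; exact hB
            · have := (in5_iff _ _).mp hin; omega
            · intro hne2; rw [Prod.mk.injEq] at hne2; omega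
            · ring_nf at hP ⊢; exact hP

lemma foldlM_congr {α σ ε : Type} (l : List α) (f g : σ → α → Except ε σ)
    (h : ∀ a ∈ l, ∀ s, f s a = g s a) : ∀ s, List.foldlM f s l = List.foldlM g s l := by
  induction l with
  | nil => intro s; rfl
  | cons a l ih =>
    intro s
    rw [List.foldlM_cons, List.foldlM_cons, h a List.mem_cons_self s]
    cases hga : g s a with
    | error e => rfl
    | ok s' =>
      simp only [Bind.bind, Except.bind]
      exact ih (fun x hx s => h x (List.mem_cons_of_mem _ hx) s) s'

lemma not_bfs_eq_viol (place : List String) (r c : Int)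
    (hr : 0 ≤ r) (hr5 : r < 5) (hc : 0 ≤ c) (hc5 : c < 5) :
    (!(pvBFS r c place)) = pvViolation place r c := by
  have h := (bfs_false_iff place r c hr hr5 hc hc5).trans (viol_iff place r c hr hr5 hc hc5)
  cases hb : pvBFS r c place <;> cases hv : pvViolation place r c <;> simp_all

-- ===== VERDICT (by name: the statement is the Claim_ definition above) =====
theorem checkOk_spec : Claim_equal_checkOk := by
  intro place hdom hpre
  unfold Spec_checkOk checkOk checkOk_alt
  have hcell : ∀ row col : Int, 0 ≤ row → row < (place.length : Int) → 0 ≤ col →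
      col < ((pvRow place row).length : Int) →
      (if pvCell place row col == 'P' then
        (if !(pvBFS row col place) then Except.error (0:Int) else Except.ok ())
      else Except.ok ()) =
      (if pvCell place row col == 'P' && pvViolation place row col then Except.error (0:Int)
      else Except.ok ()) := by
    intro row col h1 h2 h3 h4
    have hrl : pvRow place row = (place[row.toNat]'(by omega)).toList := by
      unfold pvRow
      rw [pyGetD_nonneg _ _ _ h1, List.getD_eq_getElem _ _ (by omega)]
    rcases hpre with hnoP | ⟨h5, hrows⟩
    · have hmem : pvCell place row col ∈ pvRow place row := by
        unfold pvCell
        rw [pyGetD_nonneg _ _ _ h3, List.getD_eq_getElem _ _ (by omega)]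
        exact List.getElem_mem _
      have hne : pvCell place row col ≠ 'P' := by
        intro hEq
        apply hnoP (place[row.toNat]'(by omega)) (List.getElem_mem _)
        rw [← hrl, ← hEq]
        exact hmem
      have hfalse : (pvCell place row col == 'P') = false := by simpa using hne
      rw [hfalse]
      simp
    · have hrow5 : row < 5 := by rw [h5] at h2; exact_mod_cast h2
      have hcol5 : col < 5 := by
        have : (pvRow place row).length = 5 := by
          rw [hrl]
          have := hrows (place[row.toNat]'(by omega)) (List.getElem_mem _)
          simpa using this
        rw [this] at h4
        exact_mod_cast h4
      by_cases hp : (pvCell place row col == 'P') = true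
      · rw [hp, not_bfs_eq_viol place row col h1 hrow5 h3 hcol5]
        simp
      · have hfalse : (pvCell place row col == 'P') = false := by
          simpa using hp
        rw [hfalse]
        simp
  have houter := foldlM_congr (PySem.List.pyRange 0 (place.length : Int) 1)
    (fun _ row => (PySem.List.pyRange 0 ((pvRow place row).length : Int) 1).foldlM (fun _ col =>
        if pvCell place row col == 'P' then
          (if !(pvBFS row col place) then Except.error (0 : Int) else .ok ())
        else .ok ()) ())
    (fun _ row => (PySem.List.pyRange 0 ((pvRow place row).length : Int) 1).foldlM (fun _ col =>
        if pvCell place row col == 'P' && pvViolation place row col then Except.error (0 : Int)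
        else .ok ()) ())
    (fun row hrow s => by
      have hb1 := (PySem.List.mem_pyRange_one).mp hrow
      exact foldlM_congr _ _ _ (fun col hcol s' => by
        have hb2 := (PySem.List.mem_pyRange_one).mp hcol
        exact hcell row col hb1.1 hb1.2 hb2.1 hb2.2) ()) ()
  rw [houter]
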